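-- pv_equiv track=rewrite | github.com/AaronJ59/Projects | Eternal Encouragement/helpers.py | image_find
-- ===== SOURCE A (Python) =====
-- def image_find(reference):
--     books_by_author = {
--         'David': ['Psalm'],
--         'Isaiah': ['Isaiah'],
--         'James': ['James'],
--         'John': ['John', 'Revelation'],
--         'Joshua': ['Joshua'],
--         'Matthew': ['Matthew'],
--         'Moses': ['Genesis', 'Exodus', 'Leviticus', 'Numbers', 'Deuteronomy'],
--         'Paul': ['Philippians', 'Hebrews', 'Timothy', 'Corinthians', 'Galatians', 'Ephesians'],
--         'Peter': ['Peter'],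
--         'Solomon': ['Proverbs', 'Ecclesiastes']
--     }
--
--     book_name = ""
--     reference_parts = reference.split()
--     for part in reference_parts:
--         if part.isdigit() or part.replace(":", "").isdigit():
--             continue
--         book_name = book_name + (part + " ")
--     book_name = book_name.strip()
--
--     for author, books in books_by_author.items():
--         if book_name in books:
--             return author
-- ===== SOURCE B (Python) =====
-- _AUTHOR_BY_BOOK = {
--     'Psalm': 'David',
--     'Isaiah': 'Isaiah',
--     'James': 'James',
--     'John': 'John', 'Revelation': 'John',
--     'Joshua': 'Joshua',
--     'Matthew': 'Matthew',
--     'Genesis': 'Moses', 'Exodus': 'Moses', 'Leviticus': 'Moses',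
--     'Numbers': 'Moses', 'Deuteronomy': 'Moses',
--     'Philippians': 'Paul', 'Hebrews': 'Paul', 'Timothy': 'Paul',
--     'Corinthians': 'Paul', 'Galatians': 'Paul', 'Ephesians': 'Paul',
--     'Peter': 'Peter',
--     'Proverbs': 'Solomon', 'Ecclesiastes': 'Solomon',
-- }
--
--
-- def image_find(reference):
--     words = [w for w in reference.split()
--              if not (w.isdigit() or w.replace(":", "").isdigit())]
--     return _AUTHOR_BY_BOOK.get(" ".join(words))
-- ===== Notes on version B (the rewrite author's own statement) =====
-- stated objective: idiomatic
-- what changed: B replaces A's scan over the authors dict with a per-author list-membership test by a flat book-to-author reverse dict built once and a single .get lookup, and builds the book name with a filter comprehension plus a space-join instead of concatenation-and-strip.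
import Mathlib
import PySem

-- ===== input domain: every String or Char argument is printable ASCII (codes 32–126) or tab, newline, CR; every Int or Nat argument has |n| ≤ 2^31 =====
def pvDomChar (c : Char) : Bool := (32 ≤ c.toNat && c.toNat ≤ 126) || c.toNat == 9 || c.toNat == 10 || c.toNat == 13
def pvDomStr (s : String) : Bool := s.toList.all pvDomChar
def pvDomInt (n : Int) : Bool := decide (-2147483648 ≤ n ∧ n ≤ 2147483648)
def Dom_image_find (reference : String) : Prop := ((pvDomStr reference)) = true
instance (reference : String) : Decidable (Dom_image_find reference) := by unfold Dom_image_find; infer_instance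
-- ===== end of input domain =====

-- B replaces A's author-scanning membership loop by a flat book→author dict built once and a single
-- lookup, and builds the book name with filter + " ".join instead of concatenation + strip (idiomatic).

-- ===== PORT A =====
def booksByAuthor : PySem.Dict String (List String) := PySem.Dict.ofList
  [("David", ["Psalm"]),
   ("Isaiah", ["Isaiah"]),
   ("James", ["James"]),
   ("John", ["John", "Revelation"]),
   ("Joshua", ["Joshua"]),
   ("Matthew", ["Matthew"]),
   ("Moses", ["Genesis", "Exodus", "Leviticus", "Numbers", "Deuteronomy"]),
   ("Paul", ["Philippians", "Hebrews", "Timothy", "Corinthians", "Galatians", "Ephesians"]),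
   ("Peter", ["Peter"]),
   ("Solomon", ["Proverbs", "Ecclesiastes"])]

-- the 'for author, books in books_by_author.items(): if book_name in books: return author' loop
def findAuthor : List (String × List String) → String → Option String
  | [], _ => none
  | (author, books) :: rest, bookName =>
    if books.contains bookName then some author else findAuthor rest bookName

def image_find (reference : String) : Option String :=
  let referenceParts := PySem.Str.split₀ reference
  let bookName := referenceParts.foldl
    (fun acc part =>
      if PySem.Str.strIsdigit part || PySem.Str.strIsdigit (PySem.Str.replace part ":" "") then acc
      else acc ++ (part ++ " "))
    ""
  let bookName := PySem.Str.strip bookName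
  findAuthor (PySem.Dict.items booksByAuthor) bookName

-- ===== PORT B =====
def authorByBook : PySem.Dict String String := PySem.Dict.ofList
  [("Psalm", "David"),
   ("Isaiah", "Isaiah"),
   ("James", "James"),
   ("John", "John"), ("Revelation", "John"),
   ("Joshua", "Joshua"),
   ("Matthew", "Matthew"),
   ("Genesis", "Moses"), ("Exodus", "Moses"), ("Leviticus", "Moses"),
   ("Numbers", "Moses"), ("Deuteronomy", "Moses"),
   ("Philippians", "Paul"), ("Hebrews", "Paul"), ("Timothy", "Paul"),
   ("Corinthians", "Paul"), ("Galatians", "Paul"), ("Ephesians", "Paul"),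
   ("Peter", "Peter"),
   ("Proverbs", "Solomon"), ("Ecclesiastes", "Solomon")]

def image_find_alt (reference : String) : Option String :=
  let words := (PySem.Str.split₀ reference).filter
    (fun w => !(PySem.Str.strIsdigit w || PySem.Str.strIsdigit (PySem.Str.replace w ":" "")))
  PySem.Dict.get? authorByBook (PySem.Str.join " " words)

-- ===== PRECONDITION & SPEC =====
def Spec_image_find (reference : String) (out : Option String) : Prop := out = image_find_alt reference
instance (reference : String) (out : Option String) : Decidable (Spec_image_find reference out) := by unfold Spec_image_find; infer_instance

-- ===== CLAIM (what is proved, stated in full; the proofs are below) =====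
def Claim_equal_image_find : Prop := ∀ (reference : String), Dom_image_find reference → Spec_image_find reference (image_find reference)

-- ===== LEMMAS AND PROOFS =====

-- tokens produced by split() are nonempty and whitespace-free
def GoodWord (w : List Char) : Prop := w ≠ [] ∧ ∀ c ∈ w, PySem.Chars.isspace c = false

theorem split₀_go_good (s : List Char) : ∀ (cur : List Char) (acc : List (List Char)),
    (∀ c ∈ cur, PySem.Chars.isspace c = false) →
    (∀ w ∈ acc, GoodWord w) →
    ∀ w ∈ PySem.Chars.split₀.go s cur acc, GoodWord w := by
  induction s with
  | nil =>
    intro cur acc hcur hacc w hw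
    by_cases hc : cur.isEmpty <;> simp [PySem.Chars.split₀.go, hc] at hw
    · exact hacc w hw
    · rcases hw with h | h
      · exact hacc w h
      · subst h
        exact ⟨by simpa [List.isEmpty_iff] using hc,
               fun c hc' => hcur c (List.mem_reverse.mp hc')⟩
  | cons c rest ih =>
    intro cur acc hcur hacc w hw
    rw [PySem.Chars.split₀.go] at hw
    by_cases hsp : PySem.Chars.isspace c
    · simp only [hsp, if_true] at hw
      by_cases hc : cur.isEmpty
      · simp only [hc, if_true] at hw
        exact ih [] acc (by simp) hacc w hw
      · simp only [hc] at hw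
        refine ih [] (cur.reverse :: acc) (by simp) ?_ w hw
        intro v hv
        rcases List.mem_cons.mp hv with h | h
        · subst h
          exact ⟨by simpa [List.isEmpty_iff] using hc,
                 fun d hd => hcur d (List.mem_reverse.mp hd)⟩
        · exact hacc v h
    · simp only [hsp] at hw
      refine ih (c :: cur) acc ?_ hacc w hw
      intro d hd
      rcases List.mem_cons.mp hd with h | h
      · subst h; simpa using hsp
      · exact hcur d h

theorem split₀_good (s : List Char) : ∀ w ∈ PySem.Chars.split₀ s, GoodWord w :=
  split₀_go_good s [] [] (by simp) (by simp)

-- whitespace-stripping helpers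
theorem dropWhile_eq_self_of_all (l : List Char) (h : ∀ c ∈ l, PySem.Chars.isspace c = false) :
    List.dropWhile PySem.Chars.isspace l = l := by
  induction l with
  | nil => rfl
  | cons c t ih =>
    simp only [List.dropWhile_cons, h c (List.mem_cons_self), Bool.false_eq_true, if_false]

theorem rstrip_append_space (x : List Char) :
    PySem.Chars.rstrip (x ++ [' ']) = PySem.Chars.rstrip x := by
  simp [PySem.Chars.rstrip, PySem.Chars.isspace]

theorem rstrip_append_of_ne (a b : List Char)
    (h : List.dropWhile PySem.Chars.isspace b.reverse ≠ []) :
    PySem.Chars.rstrip (a ++ b) = a ++ PySem.Chars.rstrip b := by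
  simp [PySem.Chars.rstrip, List.dropWhile_append, List.isEmpty_iff, h]

theorem rstrip_eq_self_of_good (w : List Char) (h : ∀ c ∈ w, PySem.Chars.isspace c = false) :
    PySem.Chars.rstrip w = w := by
  simp [PySem.Chars.rstrip, dropWhile_eq_self_of_all _ (fun c hc => h c (List.mem_reverse.mp hc))]

theorem lstrip_eq_self_of_head (c : Char) (t : List Char) (h : PySem.Chars.isspace c = false) :
    PySem.Chars.lstrip (c :: t) = c :: t := by
  simp [PySem.Chars.lstrip, h]

-- A's 'name + (part + " ")' accumulation, seen on the char level
theorem flatTrail_eq (ws : List (List Char)) (h : ws ≠ []) :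
    (ws.map (· ++ [' '])).flatten = PySem.Chars.join [' '] ws ++ [' '] := by
  induction ws with
  | nil => exact absurd rfl h
  | cons w t ih =>
    cases t with
    | nil => simp [PySem.Chars.join, List.intercalate]
    | cons b t' =>
      rw [List.map_cons, List.flatten_cons, ih (by simp), PySem.Chars.join_cons_cons]
      simp

theorem rstrip_join (ws : List (List Char)) (h : ∀ w ∈ ws, GoodWord w) :
    PySem.Chars.rstrip (PySem.Chars.join [' '] ws) = PySem.Chars.join [' '] ws := by
  induction ws with
  | nil => rfl
  | cons w t ih =>
    cases t with
    | nil =>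
      simp only [PySem.Chars.join_singleton]
      exact rstrip_eq_self_of_good w (h w (by simp)).2
    | cons b t' =>
      rw [PySem.Chars.join_cons_cons]
      have ht : ∀ v ∈ b :: t', GoodWord v := fun v hv => h v (List.mem_cons_of_mem _ hv)
      have hne : PySem.Chars.join [' '] (b :: t') ≠ [] := by
        cases t' with
        | nil => simpa [PySem.Chars.join_singleton] using (ht b (by simp)).1
        | cons c' t'' =>
          rw [PySem.Chars.join_cons_cons]
          have := (ht b (by simp)).1
          intro hcon
          simp_all
      have hd : List.dropWhile PySem.Chars.isspace (PySem.Chars.join [' '] (b :: t')).reverse ≠ [] := by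
        intro hcon
        have : PySem.Chars.rstrip (PySem.Chars.join [' '] (b :: t')) = [] := by
          simp [PySem.Chars.rstrip, hcon]
        rw [ih ht] at this
        exact hne this
      rw [show w ++ [' '] ++ PySem.Chars.join [' '] (b :: t') =
            (w ++ [' ']) ++ PySem.Chars.join [' '] (b :: t') from by simp,
        rstrip_append_of_ne _ _ hd, ih ht]

-- core parse fact: strip of the space-trailed concatenation is " ".join
theorem strip_flat_eq_join (ws : List (List Char)) (h : ∀ w ∈ ws, GoodWord w) :
    PySem.Chars.strip ((ws.map (· ++ [' '])).flatten) = PySem.Chars.join [' '] ws := by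
  cases ws with
  | nil => rfl
  | cons w t =>
    rw [flatTrail_eq _ (by simp), PySem.Chars.strip]
    obtain ⟨hw, hgood⟩ := h w (by simp)
    obtain ⟨c, w', rfl⟩ : ∃ c w', w = c :: w' := by
      cases w with | nil => exact absurd rfl hw | cons c w' => exact ⟨c, w', rfl⟩
    have hhead : ∃ r, PySem.Chars.join [' '] ((c :: w') :: t) ++ [' '] = c :: r := by
      cases t with
      | nil => exact ⟨w' ++ [' '], by simp [PySem.Chars.join_singleton]⟩
      | cons b t' =>
        refine ⟨w' ++ [' '] ++ PySem.Chars.join [' '] (b :: t') ++ [' '], ?_⟩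
        rw [PySem.Chars.join_cons_cons]; simp
    obtain ⟨r, hr⟩ := hhead
    rw [hr, lstrip_eq_self_of_head c r (hgood c (by simp)), ← hr, rstrip_append_space,
      rstrip_join _ h]

-- A's concatenation loop on the String level, moved to char lists
theorem foldl_concat_toList (parts : List String) (a : String) :
    (parts.foldl (fun acc part => acc ++ (part ++ " ")) a).toList =
      a.toList ++ ((parts.map String.toList).map (· ++ [' '])).flatten := by
  induction parts generalizing a with
  | nil => simp
  | cons p t ih =>
    simp [List.foldl_cons, ih, String.toList_append]

-- A's author scan over the grouped table equals a lookup in the flat reverse dict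
set_option maxHeartbeats 1000000 in
theorem scan_eq_lookup (bn : String) :
    findAuthor (PySem.Dict.items booksByAuthor) bn = PySem.Dict.get? authorByBook bn := by
  have hitems : PySem.Dict.items booksByAuthor =
      [("David", ["Psalm"]),("Isaiah", ["Isaiah"]),("James", ["James"]),
       ("John", ["John", "Revelation"]),("Joshua", ["Joshua"]),("Matthew", ["Matthew"]),
       ("Moses", ["Genesis", "Exodus", "Leviticus", "Numbers", "Deuteronomy"]),
       ("Paul", ["Philippians", "Hebrews", "Timothy", "Corinthians", "Galatians", "Ephesians"]),
       ("Peter", ["Peter"]),("Solomon", ["Proverbs", "Ecclesiastes"])] := by rfl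
  have hof : authorByBook = PySem.Dict.mk
      [("Psalm", "David"),("Isaiah", "Isaiah"),("James", "James"),("John", "John"),
       ("Revelation", "John"),("Joshua", "Joshua"),("Matthew", "Matthew"),("Genesis", "Moses"),
       ("Exodus", "Moses"),("Leviticus", "Moses"),("Numbers", "Moses"),("Deuteronomy", "Moses"),
       ("Philippians", "Paul"),("Hebrews", "Paul"),("Timothy", "Paul"),("Corinthians", "Paul"),
       ("Galatians", "Paul"),("Ephesians", "Paul"),("Peter", "Peter"),("Proverbs", "Solomon"),
       ("Ecclesiastes", "Solomon")] := by rfl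
  rw [hitems, hof]
  by_cases h : bn ∈ ["Psalm","Isaiah","James","John","Revelation","Joshua","Matthew","Genesis",
      "Exodus","Leviticus","Numbers","Deuteronomy","Philippians","Hebrews","Timothy","Corinthians",
      "Galatians","Ephesians","Peter","Proverbs","Ecclesiastes"]
  · fin_cases h <;> rfl
  · simp only [List.mem_cons, not_or] at h
    obtain ⟨h1,h2,h3,h4,h5,h6,h7,h8,h9,h10,h11,h12,h13,h14,h15,h16,h17,h18,h19,h20,h21,-⟩ := h
    simp [findAuthor, PySem.Dict.get?,
      h1,h2,h3,h4,h5,h6,h7,h8,h9,h10,h11,h12,h13,h14,h15,h16,h17,h18,h19,h20,h21,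
      Ne.symm h1, Ne.symm h2, Ne.symm h3, Ne.symm h4, Ne.symm h5, Ne.symm h6, Ne.symm h7,
      Ne.symm h8, Ne.symm h9, Ne.symm h10, Ne.symm h11, Ne.symm h12, Ne.symm h13, Ne.symm h14,
      Ne.symm h15, Ne.symm h16, Ne.symm h17, Ne.symm h18, Ne.symm h19, Ne.symm h20, Ne.symm h21]

-- the two book names agree
theorem bookName_eq (reference : String) :
    PySem.Str.strip ((PySem.Str.split₀ reference).foldl
      (fun acc part =>
        if PySem.Str.strIsdigit part || PySem.Str.strIsdigit (PySem.Str.replace part ":" "") then acc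
        else acc ++ (part ++ " "))
      "") =
    PySem.Str.join " " ((PySem.Str.split₀ reference).filter
      (fun w => !(PySem.Str.strIsdigit w || PySem.Str.strIsdigit (PySem.Str.replace w ":" "")))) := by
  apply String.toList_inj.mp
  set q : String → Bool :=
    fun w => !(PySem.Str.strIsdigit w || PySem.Str.strIsdigit (PySem.Str.replace w ":" "")) with hq
  have hswap : (PySem.Str.split₀ reference).foldl
      (fun acc part =>
        if PySem.Str.strIsdigit part || PySem.Str.strIsdigit (PySem.Str.replace part ":" "") then acc
        else acc ++ (part ++ " ")) "" =
      ((PySem.Str.split₀ reference).filter q).foldl (fun acc part => acc ++ (part ++ " ")) "" := by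
    rw [← PySem.List.foldl_if_eq_foldl_filter q (fun acc part => acc ++ (part ++ " "))]
    apply PySem.List.foldl_congr_mem
    intro acc x _
    rw [hq]
    cases hx : PySem.Str.strIsdigit x || PySem.Str.strIsdigit (PySem.Str.replace x ":" "") <;>
      simp only [hx, Bool.not_true, Bool.not_false, if_true, if_false, Bool.false_eq_true]
  rw [hswap, PySem.Str.toList_strip, foldl_concat_toList, PySem.Str.toList_join]
  have hgood : ∀ w ∈ ((PySem.Str.split₀ reference).filter q).map String.toList, GoodWord w := by
    intro w hw
    obtain ⟨p, hp, rfl⟩ := List.mem_map.mp hw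
    have hp' : p ∈ PySem.Str.split₀ reference := List.mem_of_mem_filter hp
    have : p.toList ∈ PySem.Chars.split₀ reference.toList := by
      rw [← PySem.Str.split₀_map_toList]
      exact List.mem_map_of_mem hp'
    exact split₀_good _ _ this
  have := strip_flat_eq_join _ hgood
  simpa using this

-- ===== VERDICT (by name: the statement is the Claim_ definition above) =====
theorem image_find_spec : Claim_equal_image_find := by
  intro reference _
  unfold Spec_image_find image_find image_find_alt
  simp only []
  rw [bookName_eq, scan_eq_lookup]
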